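-- pv_equiv track=rewrite | github.com/matirowensztein/fundamentos-programacion | PR-PARCIAL/Parcial4.py | mas_partidos_jugados
-- ===== SOURCE A (Python) =====
-- def mas_partidos_jugados(dicc_equipos):
--     equipos_partidos = []
--     mas_partidos = 0
--
--     for equipo,partidos in dicc_equipos.items():
--         if sum(partidos) > mas_partidos:
--             equipos_partidos = []
--             mas_partidos = sum(partidos)
--             equipos_partidos.append(equipo)
--
--         if equipo not in equipos_partidos and sum(partidos) == mas_partidos:
--             equipos_partidos.append(equipo )
--
--     return equipos_partidos
-- ===== SOURCE B (Python) =====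
-- def mas_partidos_jugados(dicc_equipos):
--     # two passes: compute the threshold (floored at 0, matching the task's
--     # "at least zero matches" baseline), then collect teams hitting it
--     threshold = max([0] + [sum(p) for p in dicc_equipos.values()])
--     return [equipo for equipo, partidos in dicc_equipos.items()
--             if sum(partidos) == threshold]
-- ===== Notes on version B (the rewrite author's own statement) =====
-- stated objective: simpler
-- what changed: A's single pass with a running maximum and list-reset is replaced by two plain passes: compute the threshold max(0, max of team sums) once, then a comprehension collecting teams whose sum equals it, in dict order.
import Mathlib
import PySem

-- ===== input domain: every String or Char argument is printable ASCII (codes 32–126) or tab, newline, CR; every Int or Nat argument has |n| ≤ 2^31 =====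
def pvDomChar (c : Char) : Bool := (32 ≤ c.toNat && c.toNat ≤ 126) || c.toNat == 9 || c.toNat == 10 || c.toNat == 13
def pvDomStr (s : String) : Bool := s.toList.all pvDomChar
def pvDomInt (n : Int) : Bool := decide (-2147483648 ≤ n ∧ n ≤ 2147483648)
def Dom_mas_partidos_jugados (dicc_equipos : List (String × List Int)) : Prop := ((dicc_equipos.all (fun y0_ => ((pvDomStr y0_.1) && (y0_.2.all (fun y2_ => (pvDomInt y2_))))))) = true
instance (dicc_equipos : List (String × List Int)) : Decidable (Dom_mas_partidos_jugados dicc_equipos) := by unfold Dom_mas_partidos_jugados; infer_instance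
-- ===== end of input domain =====

-- B replaces A's single running-max pass (with list reset) by two passes: threshold first, then filter; objective: simpler.

-- ===== PORT A =====
-- one step of A's for-loop over (equipos_partidos, mas_partidos)
def pvStepA (st : List String × Int) (kv : String × List Int) : List String × Int :=
  let s := kv.2.sum
  let st1 := if s > st.2 then ([kv.1], s) else st
  if kv.1 ∉ st1.1 ∧ s = st1.2 then (st1.1 ++ [kv.1], st1.2) else st1

def mas_partidos_jugados (dicc_equipos : List (String × List Int)) : List String :=
  (dicc_equipos.foldl pvStepA ([], 0)).1

-- ===== PORT B =====
def mas_partidos_jugados_alt (dicc_equipos : List (String × List Int)) : List String :=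
  let threshold := (dicc_equipos.map (fun kv => kv.2.sum)).foldl max 0
  (dicc_equipos.filter (fun kv => kv.2.sum == threshold)).map Prod.fst

-- ===== PRECONDITION & SPEC =====
-- Pre_ excludes association lists with duplicate keys: a Python dict cannot
-- contain two equal keys, so such lists do not represent any input A runs on.
def Pre_mas_partidos_jugados (dicc_equipos : List (String × List Int)) : Prop :=
  (dicc_equipos.map Prod.fst).Nodup
instance (dicc_equipos : List (String × List Int)) : Decidable (Pre_mas_partidos_jugados dicc_equipos) := by unfold Pre_mas_partidos_jugados; infer_instance

def pvWitness_mas_partidos_jugados : (List (String × List Int)) :=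
  [("boca", [2, 3]), ("river", [5]), ("racing", [1])]

def Spec_mas_partidos_jugados (dicc_equipos : List (String × List Int)) (out : List String) : Prop := out = mas_partidos_jugados_alt dicc_equipos
instance (dicc_equipos : List (String × List Int)) (out : List String) : Decidable (Spec_mas_partidos_jugados dicc_equipos out) := by unfold Spec_mas_partidos_jugados; infer_instance

-- ===== CLAIM (what is proved, stated in full; the proofs are below) =====
def Claim_equal_mas_partidos_jugados : Prop := ∀ (dicc_equipos : List (String × List Int)), Dom_mas_partidos_jugados dicc_equipos → Pre_mas_partidos_jugados dicc_equipos → Spec_mas_partidos_jugados dicc_equipos (mas_partidos_jugados dicc_equipos)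

-- ===== LEMMAS AND PROOFS =====

theorem pvLeFoldlMax (l : List Int) : ∀ m : Int, m ≤ l.foldl max m := by
  induction l with
  | nil => intro m; simp
  | cons x xs ih =>
    intro m
    exact le_trans (le_max_left m x) (ih (max m x))

-- invariant for A's loop: starting from (E, m) with 0 ≤ m and E disjoint from
-- the remaining keys (which are nodup), the fold produces the eventual
-- threshold t = foldl max m (sums) and, as the list, E (kept iff t = m)
-- followed by the keys of l whose sum equals t.
theorem pvFoldA_eq (l : List (String × List Int)) :
    ∀ (E : List String) (m : Int), 0 ≤ m →
    (∀ k ∈ E, k ∉ l.map Prod.fst) → (l.map Prod.fst).Nodup →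
    l.foldl pvStepA (E, m) =
      ((if (l.map (fun kv => kv.2.sum)).foldl max m = m then E else []) ++
        (l.filter (fun kv => kv.2.sum == (l.map (fun kv => kv.2.sum)).foldl max m)).map Prod.fst,
       (l.map (fun kv => kv.2.sum)).foldl max m) := by
  induction l with
  | nil => intro E m hm _ _; simp
  | cons kv rest ih =>
    intro E m hm hdisj hnodup
    simp only [List.map_cons, List.nodup_cons] at hnodup
    have hkey : kv.1 ∉ rest.map Prod.fst := hnodup.1
    have hEk : kv.1 ∉ E := by
      intro h
      exact (hdisj kv.1 h) (by simp)
    set s := kv.2.sum with hs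
    have hrest :
        ∀ (E' : List String) (m' : Int), 0 ≤ m' →
        (∀ k ∈ E', k ∉ rest.map Prod.fst) →
        rest.foldl pvStepA (E', m') =
          ((if (rest.map (fun kv => kv.2.sum)).foldl max m' = m' then E' else []) ++
            (rest.filter (fun kv => kv.2.sum == (rest.map (fun kv => kv.2.sum)).foldl max m')).map Prod.fst,
           (rest.map (fun kv => kv.2.sum)).foldl max m') :=
      fun E' m' h1 h2 => ih E' m' h1 h2 hnodup.2
    by_cases hgt : s > m
    · -- first branch fires, list is reset to [kv.1]
      have hstep : pvStepA (E, m) kv = ([kv.1], s) := by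
        simp [pvStepA, hgt, ← hs]
      rw [List.foldl_cons, hstep,
        hrest [kv.1] s (le_of_lt (lt_of_le_of_lt hm hgt))
          (by intro k hk; simp at hk; subst hk; exact hkey)]
      have hts : s ≤ (rest.map (fun kv => kv.2.sum)).foldl max s := pvLeFoldlMax _ _
      have hmax : (rest.map (fun kv => kv.2.sum)).foldl max (max m s) =
          (rest.map (fun kv => kv.2.sum)).foldl max s := by
        rw [max_eq_right (le_of_lt hgt)]
      have hsm' : ¬ (s = m) := by omega
      by_cases hte : (rest.map (fun kv => kv.2.sum)).foldl max s = s
      · simp [← hs, hmax, hte, hsm']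
      · have htne : (rest.map (fun kv => kv.2.sum)).foldl max s ≠ m := by omega
        have hsne : s ≠ (rest.map (fun kv => kv.2.sum)).foldl max s := fun h => hte h.symm
        simp [← hs, hmax, hte, htne, hsne]
    · -- no reset; maybe append
      have hmax : max m s = m := max_eq_left (not_lt.mp hgt)
      have htm : s ≤ m := not_lt.mp hgt
      have hmrest : (rest.map (fun kv => kv.2.sum)).foldl max (max m s) =
          (rest.map (fun kv => kv.2.sum)).foldl max m := by rw [hmax]
      have htms : m ≤ (rest.map (fun kv => kv.2.sum)).foldl max m := pvLeFoldlMax _ _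
      by_cases hsm : s = m
      · have hstep : pvStepA (E, m) kv = (E ++ [kv.1], m) := by
          simp [pvStepA, ← hs, hsm, hEk]
        rw [List.foldl_cons, hstep,
          hrest (E ++ [kv.1]) m hm
            (by intro k hk; simp at hk
                rcases hk with hk | hk
                · exact fun hmem => hdisj k hk (by simp [hmem])
                · subst hk; exact hkey)]
        by_cases hte : (rest.map (fun kv => kv.2.sum)).foldl max m = m
        · simp [← hs, hsm, hte]
        · have : s ≠ (rest.map (fun kv => kv.2.sum)).foldl max m := by
            rw [hsm]; exact fun h => hte h.symm
          simp [← hs, hmrest, hte, this]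
      · have hstep : pvStepA (E, m) kv = (E, m) := by
          simp [pvStepA, hgt, ← hs, hsm]
        rw [List.foldl_cons, hstep,
          hrest E m hm (by intro k hk; exact fun h => hdisj k hk (by simp [h]))]
        have hslt : s < m := lt_of_le_of_ne htm hsm
        have : s ≠ (rest.map (fun kv => kv.2.sum)).foldl max m := by omega
        simp [← hs, hmrest, this]

-- ===== VERDICT (by name: the statement is the Claim_ definition above) =====
theorem mas_partidos_jugados_spec : Claim_equal_mas_partidos_jugados := by
  intro d _ hpre
  unfold Spec_mas_partidos_jugados mas_partidos_jugados mas_partidos_jugados_alt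
  rw [pvFoldA_eq d [] 0 le_rfl (by simp) hpre]
  simp
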